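-- pv_equiv track=rewrite | github.com/philipwilsonTHG/psh | psh/multiline_handler.py | _has_line_continuation
-- ===== SOURCE A (Python) =====
-- def _has_line_continuation(command: str) -> bool:
--     """Check if command ends with line continuation."""
--     # Don't process empty strings
--     if not command:
--         return False
--
--     lines = command.splitlines(keepends=True)
--     if not lines:
--         return False
--
--     # Get the last line (including any trailing newline)
--     last_line = lines[-1]
--
--     # If there's a newline, check the content before it
--     if last_line.endswith('\n'):
--         content = last_line[:-1].rstrip()
--     else:
--         content = last_line.rstrip()
--
--     if content.endswith('\\'):
--         # Count preceding backslashes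
--         count = 0
--         for i in range(len(content) - 2, -1, -1):
--             if content[i] == '\\':
--                 count += 1
--             else:
--                 break
--         # Odd number of total backslashes means the last one is not escaped
--         return (count % 2) == 0
--
--     return False
-- ===== SOURCE B (Python) =====
-- def _has_line_continuation(command: str) -> bool:
--     """Check if command ends with line continuation."""
--     # Walk backward from the end of the string: skip one trailing line
--     # terminator (\n, \r\n or \r), skip trailing blanks of the last line,
--     # then the answer is whether an odd-length run of backslashes ends there.
--     i = len(command) - 1
--     if i >= 0 and command[i] == '\n':
--         i -= 1
--         if i >= 0 and command[i] == '\r':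
--             i -= 1
--     elif i >= 0 and command[i] == '\r':
--         i -= 1
--     while i >= 0 and command[i] in ' \t':
--         i -= 1
--     odd = False
--     while i >= 0 and command[i] == '\\':
--         odd = not odd
--         i -= 1
--     return odd
-- ===== Notes on version B (the rewrite author's own statement) =====
-- stated objective: alternative
-- what changed: B never splits the command into lines at all: instead of A's splitlines(keepends=True) + rstrip + forward-indexed backslash-counting loop, B walks a single index backward from the end of the raw string in three phases (skip one line terminator, skip trailing blanks, toggle a parity flag over the backslash run), returning the parity flag.
import Mathlib
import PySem

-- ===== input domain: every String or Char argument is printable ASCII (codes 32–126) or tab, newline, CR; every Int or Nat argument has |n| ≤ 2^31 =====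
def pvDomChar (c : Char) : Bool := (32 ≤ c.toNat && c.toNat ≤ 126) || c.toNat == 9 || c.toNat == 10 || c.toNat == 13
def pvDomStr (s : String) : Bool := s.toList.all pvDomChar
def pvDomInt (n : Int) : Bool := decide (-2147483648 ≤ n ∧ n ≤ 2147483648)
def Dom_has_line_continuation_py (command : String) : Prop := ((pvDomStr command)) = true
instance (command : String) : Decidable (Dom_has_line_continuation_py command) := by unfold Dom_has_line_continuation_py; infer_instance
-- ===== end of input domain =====

-- B never splits the command into lines: it walks a single cursor backward from the
-- end of the raw string (skip one line terminator, skip trailing blanks, toggle a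
-- parity flag over the backslash run); objective: alternative.

-- ===== PORT A =====
/-- Python's line-break set (exactly CPython's `str.splitlines` break characters). -/
def pyIsBreak (c : Char) : Bool :=
  have n := c.toNat
  decide (n = 10) || decide (n = 13) || decide (n = 11) || decide (n = 12) || decide (n = 28) ||
    decide (n = 29) || decide (n = 30) || decide (n = 133) || decide (n = 8232) || decide (n = 8233)

/-- Hand port of `command.splitlines(keepends=True)` (PySem only provides the
    keepends=False form): CPython's split loop with the line terminator kept on each
    line; exact — same break set and the same `\r\n` pairing as CPython. -/
def splitKeep : List Char → List Char → List (List Char) → List (List Char)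
  | [], cur, acc => if cur.isEmpty then acc.reverse else (cur.reverse :: acc).reverse
  | '\r' :: '\n' :: rest, cur, acc => splitKeep rest [] ((cur.reverse ++ ['\r', '\n']) :: acc)
  | c :: rest, cur, acc =>
      if pyIsBreak c then splitKeep rest [] ((cur.reverse ++ [c]) :: acc)
      else splitKeep rest (c :: cur) acc

/-- Port of A's counting loop `for i in range(len(content)-2, -1, -1): …` with its
    `count` accumulator. The Nat argument is i+1 (0 means the range is exhausted);
    `content[i]` is in range at every call this file makes, ported via `getD`. -/
def countPrec (content : List Char) : Nat → Nat → Nat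
  | count, 0 => count
  | count, i + 1 =>
      if content.getD i ' ' == '\\' then countPrec content (count + 1) i else count

def has_line_continuation_py (command : String) : Bool :=
  if command.toList.isEmpty then false
  else
    let lines := splitKeep command.toList [] []
    if lines.isEmpty then false
    else
      match PySem.List.pyGet? lines (-1) with
      | none => false  -- unreachable: lines is nonempty
      | some last_line =>
        let content :=
          if PySem.Chars.endswith last_line ['\n'] then
            PySem.Chars.rstrip (PySem.List.slice last_line none (some (-1)))
          else PySem.Chars.rstrip last_line
        if PySem.Chars.endswith content ['\\'] then
          (countPrec content 0 (content.length - 1)) % 2 == 0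
        else false

-- ===== PORT B =====
-- Source B walks an index backward over `command`; the port walks the reversed
-- character list instead (same three phases, same tests, in the same order).

/-- Phase 1 of Source B: skip one trailing line terminator (`\n`, `\r\n` or `\r`). -/
def bSkipTerm : List Char → List Char
  | [] => []
  | c :: r =>
    if c == '\n' then
      match r with
      | d :: r' => if d == '\r' then r' else d :: r'
      | [] => []
    else if c == '\r' then r
    else c :: r

/-- Phase 2 of Source B: the `while … command[i] in ' \t'` loop. -/
def bSkipWs : List Char → List Char
  | [] => []
  | c :: r => if c == ' ' || c == '\t' then bSkipWs r else c :: r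

/-- Phase 3 of Source B: the `while … command[i] == '\\'` loop toggling `odd`. -/
def bOdd : List Char → Bool → Bool
  | [], odd => odd
  | c :: r, odd => if c == '\\' then bOdd r (!odd) else odd

def has_line_continuation_py_alt (command : String) : Bool :=
  bOdd (bSkipWs (bSkipTerm command.toList.reverse)) false

-- ===== PRECONDITION & SPEC =====
def Spec_has_line_continuation_py (command : String) (out : Bool) : Prop := out = has_line_continuation_py_alt command
instance (command : String) (out : Bool) : Decidable (Spec_has_line_continuation_py command out) := by unfold Spec_has_line_continuation_py; infer_instance

-- ===== CLAIM (what is proved, stated in full; the proofs are below) =====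
def Claim_equal_has_line_continuation_py : Prop := ∀ (command : String), Dom_has_line_continuation_py command → Spec_has_line_continuation_py command (has_line_continuation_py command)

-- ===== LEMMAS AND PROOFS =====

/-- a (Dom) line break: `\n` or `\r`. -/
def brkC (c : Char) : Bool := c == '\n' || c == '\r'

/-- "not a (Dom) line break". -/
def nbC (c : Char) : Bool := !(brkC c)

/-- The reverse of A's last keepends line, read off the reversed input:
    an optional leading (= trailing in the string) terminator, then the
    reversed last line up to the previous break. -/
def lcr : List Char → List Char
  | [] => []
  | c :: r =>
    if c == '\n' then
      match r with
      | d :: r' => if d == '\r' then '\n' :: '\r' :: r'.takeWhile nbC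
                   else '\n' :: ((d :: r').takeWhile nbC)
      | [] => ['\n']
    else if c == '\r' then '\r' :: r.takeWhile nbC
    else (c :: r).takeWhile nbC

/-- "has an interior break": a break before the trailing terminator. -/
def hbi (r : List Char) : Bool := (bSkipTerm r).any brkC

theorem beq_char_toNat (c d : Char) : (c == d) = decide (c.toNat = d.toNat) := by
  by_cases h : c = d
  · subst h; simp
  · have hn : c.toNat ≠ d.toNat := fun hn => h (Char.ext (UInt32.toNat_inj.mp hn))
    simp [h, hn]

theorem break_dom (c : Char) (hd : pvDomChar c = true) (hb : pyIsBreak c = true) :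
    c = '\n' ∨ c = '\r' := by
  simp [pvDomChar] at hd
  simp [pyIsBreak] at hb
  have : c.toNat = 10 ∨ c.toNat = 13 := by omega
  rcases this with h | h
  · exact Or.inl (Char.ext (UInt32.toNat_inj.mp h))
  · exact Or.inr (Char.ext (UInt32.toNat_inj.mp h))

theorem nb_of_not_break (c : Char) (hb : pyIsBreak c = false) : nbC c = true := by
  simp [pyIsBreak] at hb
  simp [nbC, brkC, beq_char_toNat]
  omega

theorem isspace_dom (c : Char) (hd : pvDomChar c = true) :
    PySem.Chars.isspace c = (c == ' ' || c == '\t' || c == '\n' || c == '\r') := by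
  simp [pvDomChar] at hd
  rw [Bool.eq_iff_iff]
  have e1 : (' ' : Char).toNat = 32 := rfl
  have e2 : ('\t' : Char).toNat = 9 := rfl
  have e3 : ('\n' : Char).toNat = 10 := rfl
  have e4 : ('\r' : Char).toNat = 13 := rfl
  simp only [PySem.Chars.isspace, beq_char_toNat, e1, e2, e3, e4, Bool.or_eq_true, Bool.and_eq_true, decide_eq_true_eq]
  omega

theorem rstrip_append_isspace (x : List Char) (c : Char) (h : PySem.Chars.isspace c = true) :
    PySem.Chars.rstrip (x ++ [c]) = PySem.Chars.rstrip x := by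
  simp [PySem.Chars.rstrip, h]

theorem rstrip_reverse (x : List Char) :
    (PySem.Chars.rstrip x).reverse = x.reverse.dropWhile PySem.Chars.isspace := by
  simp [PySem.Chars.rstrip]

theorem slice_neg_one (l : List Char) (h : l ≠ []) :
    PySem.List.slice l none (some (-1)) = l.take (l.length - 1) := by
  have h1 : 1 ≤ l.length := List.length_pos_iff.mpr h
  have h2 : ¬((l.length : Int) + -1 < 0) := by omega
  simp [PySem.List.slice, PySem.List.clampIdx, h2]
  omega

theorem pyGet_neg_one {α : Type} (l : List α) (hl : l ≠ []) :
    PySem.List.pyGet? l (-1) = l[l.length - 1]? := by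
  have hn : 1 ≤ l.length := List.length_pos_iff.mpr hl
  have h2 : -(l.length : Int) ≤ -1 := by omega
  simp [PySem.List.pyGet?, PySem.List.pyIdx?, h2]

theorem suffix_backslash (r : List Char) (c : Char) : ['\\'] <:+ r.reverse ++ [c] ↔ c = '\\' := by
  constructor
  · rintro ⟨t, ht⟩
    have := List.append_inj_right' ht (by rfl)
    simp at this
    exact this.symm
  · rintro rfl
    exact ⟨r.reverse, rfl⟩

theorem countPrec_spec (content : List Char) :
    ∀ (i : Nat) (count : Nat), i ≤ content.length →
      countPrec content count i = count + ((content.take i).reverse.takeWhile (· == '\\')).length := by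
  intro i
  induction i with
  | zero => intro count _; simp [countPrec]
  | succ i ih =>
    intro count hi
    have hlt : i < content.length := by omega
    rw [countPrec]
    rw [List.take_add_one]
    have : content[i]?.toList = [content[i]] := by simp [List.getElem?_eq_getElem hlt]
    rw [this]
    by_cases hc : content[i] = '\\'
    · have hg : content.getD i ' ' == '\\' := by simp [List.getD, List.getElem?_eq_getElem hlt, hc]
      rw [if_pos hg, ih count.succ (by omega)]
      simp [hc]
      omega
    · have hg : ¬((content.getD i ' ' == '\\') = true) := by
        simp [List.getD, List.getElem?_eq_getElem hlt, hc]
      rw [if_neg hg]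
      rw [List.reverse_append]
      simp [hc]

/-- A's tail (endswith-backslash branch plus counting loop) computes the parity of
    the trailing backslash run, read as a takeWhile on the reversed content. -/
theorem tail_parity (content : List Char) :
    (if PySem.Chars.endswith content ['\\'] then
        ((countPrec content 0 (content.length - 1)) % 2 == 0 : Bool)
      else false)
      = ((content.reverse.takeWhile (· == '\\')).length % 2 == 1 : Bool) := by
  cases hrc : content.reverse with
  | nil =>
    have : content = [] := by simpa using congrArg List.reverse hrc
    subst this
    decide
  | cons c r =>
    have hc : content = r.reverse ++ [c] := by
      have := congrArg List.reverse hrc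
      simpa using this
    have hend : PySem.Chars.endswith content ['\\'] = (c == '\\') := by
      rw [Bool.eq_iff_iff, PySem.Chars.endswith_iff, beq_iff_eq, hc, suffix_backslash]
    rw [hend]
    by_cases hbs : c = '\\'
    · subst hbs
      rw [if_pos (by simp)]
      have hlen : content.length = r.length + 1 := by rw [hc]; simp
      have htake : content.take r.length = r.reverse := by
        rw [hc]
        exact List.take_left' (by simp)
      rw [hlen, Nat.add_sub_cancel, countPrec_spec content r.length 0 (by rw [hlen]; omega), htake]
      simp only [List.reverse_reverse, List.takeWhile, Nat.zero_add, beq_self_eq_true]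
      rcases Nat.mod_two_eq_zero_or_one (List.takeWhile (fun x => x == '\\') r).length with h | h <;>
        simp [h, Nat.add_mod]
    · rw [if_neg (by simp [hbs])]
      have hfalse : (c == '\\') = false := by simpa using hbs
      simp [List.takeWhile, hfalse]

/-- A's endswith-'\n' branch collapses: the content is always the rstrip of the line. -/
theorem content_eq (a : List Char) :
    (if PySem.Chars.endswith a ['\n'] then
      PySem.Chars.rstrip (PySem.List.slice a none (some (-1)))
    else PySem.Chars.rstrip a) = PySem.Chars.rstrip a := by
  by_cases h : PySem.Chars.endswith a ['\n'] = true
  · rw [if_pos h]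
    obtain ⟨u, hu⟩ := (PySem.Chars.endswith_iff ..).mp h
    have hane : a ≠ [] := by rw [← hu]; simp
    rw [slice_neg_one a hane, ← hu]
    have hlen : (u ++ ['\n']).length - 1 = u.length := by simp
    rw [hlen, List.take_left' rfl, rstrip_append_isspace _ _ (by decide)]
  · rw [if_neg h]

theorem bOdd_parity : ∀ (u : List Char) (odd : Bool),
    bOdd u odd = (odd ^^ ((u.takeWhile (· == '\\')).length % 2 == 1)) := by
  intro u
  induction u with
  | nil => intro odd; simp [bOdd]
  | cons c r ih =>
    intro odd
    rw [bOdd]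
    by_cases hc : (c == '\\') = true
    · rw [if_pos hc, ih]
      simp only [List.takeWhile_cons, hc, if_true]
      cases odd <;> rcases Nat.mod_two_eq_zero_or_one (List.takeWhile (fun x => x == '\\') r).length with h | h <;>
        simp [h, Nat.add_mod]
    · rw [if_neg hc]
      simp only [List.takeWhile_cons, hc]
      simp

theorem bSkipWs_eq (u : List Char) :
    bSkipWs u = u.dropWhile (fun c => c == ' ' || c == '\t') := by
  induction u with
  | nil => rfl
  | cons c r ih =>
    rw [bSkipWs, List.dropWhile]
    by_cases h : (c == ' ' || c == '\t') = true
    · rw [if_pos h, h, ih]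
    · rw [if_neg h, Bool.not_eq_true] at *
      rw [h]


theorem tw_bs_nb (x : List Char) :
    (x.takeWhile nbC).takeWhile (· == '\\') = x.takeWhile (· == '\\') := by
  induction x with
  | nil => rfl
  | cons c r ih =>
    by_cases hb : (c == '\\') = true
    · have hn : nbC c = true := by
        have : c = '\\' := by simpa using hb
        subst this; decide
      simp only [List.takeWhile_cons, hn, hb, if_true, ih]
    · by_cases hn : nbC c = true
      · simp [List.takeWhile_cons, hn, hb]
      · simp only [Bool.not_eq_true] at hn hb
        simp [List.takeWhile_cons, hn, hb]

theorem tw1 (x : List Char) (c : Char) (hc : nbC c = false) :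
    (x ++ [c]).takeWhile nbC = x.takeWhile nbC := by
  rw [List.takeWhile_append]
  split_ifs with h
  · have hx : x.takeWhile nbC = x :=
      (List.takeWhile_prefix nbC).eq_of_length h
    simp [List.takeWhile_cons, hc, hx]
  · rfl

theorem tw2 (x y : List Char) (h : x.any brkC = true) :
    (x ++ y).takeWhile nbC = x.takeWhile nbC := by
  rw [List.takeWhile_append]
  split_ifs with hl
  · exfalso
    have hx : x.takeWhile nbC = x :=
      (List.takeWhile_prefix nbC).eq_of_length hl
    obtain ⟨c, hm, hb⟩ := List.any_eq_true.mp h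
    have : nbC c = true := List.mem_takeWhile_imp (hx ▸ hm)
    simp [nbC, hb] at this
  · rfl

theorem nb_forall (x : List Char) (h : x.any brkC = false) : ∀ a ∈ x, nbC a = true := by
  simp only [List.any_eq_false] at h
  intro a ha
  simp [nbC, h a ha]

theorem tw_nb_all (x : List Char) (h : x.any brkC = false) : x.takeWhile nbC = x :=
  List.takeWhile_eq_self_iff.mpr (nb_forall x h)

theorem nb_break_false (c : Char) (hc : c = '\n' ∨ c = '\r') : nbC c = false := by
  rcases hc with rfl | rfl <;> decide

-- unfolding equations for lcr / bSkipTerm / hbi on each head shape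
theorem ne_rn : ¬('\r' : Char) = '\n' := by decide
theorem lcr_nr (r' : List Char) : lcr ('\n'::'\r'::r') = '\n'::'\r'::r'.takeWhile nbC := by
  simp [lcr]
theorem lcr_n (d : Char) (r' : List Char) (hd : d ≠ '\r') :
    lcr ('\n'::d::r') = '\n'::((d::r').takeWhile nbC) := by
  simp [lcr, hd]
theorem lcr_r (r' : List Char) : lcr ('\r'::r') = '\r'::r'.takeWhile nbC := by
  simp [lcr, ne_rn]
theorem lcr_o (c : Char) (r' : List Char) (h1 : c ≠ '\n') (h2 : c ≠ '\r') :
    lcr (c::r') = (c::r').takeWhile nbC := by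
  simp [lcr, h1, h2]
theorem bst_nr (r' : List Char) : bSkipTerm ('\n'::'\r'::r') = r' := by
  simp [bSkipTerm]
theorem bst_n (d : Char) (r' : List Char) (hd : d ≠ '\r') : bSkipTerm ('\n'::d::r') = d::r' := by
  simp [bSkipTerm, hd]
theorem bst_r (r' : List Char) : bSkipTerm ('\r'::r') = r' := by
  simp [bSkipTerm, ne_rn]
theorem bst_o (c : Char) (r' : List Char) (h1 : c ≠ '\n') (h2 : c ≠ '\r') :
    bSkipTerm (c::r') = c::r' := by
  simp [bSkipTerm, h1, h2]
theorem hbi_eq (r : List Char) : hbi r = (bSkipTerm r).any brkC := rfl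

theorem lcr_of_not_hbi (r : List Char) (h : hbi r = false) : lcr r = r := by
  rcases r with _ | ⟨c1, r1⟩
  · rfl
  · by_cases h1n : c1 = '\n'
    · subst h1n
      rcases r1 with _ | ⟨c2, r2⟩
      · rfl
      · by_cases h2r : c2 = '\r'
        · subst h2r
          rw [hbi_eq, bst_nr] at h
          rw [lcr_nr, tw_nb_all r2 h]
        · rw [hbi_eq, bst_n c2 r2 h2r] at h
          rw [lcr_n c2 r2 h2r, tw_nb_all (c2::r2) h]
    · by_cases h1r : c1 = '\r'
      · subst h1r
        rw [hbi_eq, bst_r] at h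
        rw [lcr_r, tw_nb_all r1 h]
      · rw [hbi_eq, bst_o c1 r1 h1n h1r] at h
        rw [lcr_o c1 r1 h1n h1r, tw_nb_all (c1::r1) h]

theorem S1 (r : List Char) (c : Char) (hr : r ≠ []) (hc : c = '\n' ∨ c = '\r')
    (hx : ¬(r = ['\n'] ∧ c = '\r')) : lcr (r ++ [c]) = lcr r := by
  have hcb : nbC c = false := nb_break_false c hc
  rcases r with _ | ⟨c1, r1⟩
  · exact absurd rfl hr
  · by_cases h1n : c1 = '\n'
    · subst h1n
      rcases r1 with _ | ⟨c2, r2⟩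
      · have hcn : c = '\n' := by
          rcases hc with rfl | rfl
          · rfl
          · exact absurd ⟨rfl, rfl⟩ hx
        subst hcn; decide
      · by_cases h2r : c2 = '\r'
        · subst h2r
          rw [List.cons_append, List.cons_append, lcr_nr, lcr_nr, tw1 r2 c hcb]
        · rw [List.cons_append, List.cons_append, lcr_n c2 _ h2r, lcr_n c2 r2 h2r,
              ← List.cons_append, tw1 (c2::r2) c hcb]
    · by_cases h1r : c1 = '\r'
      · subst h1r
        rw [List.cons_append, lcr_r, lcr_r, tw1 r1 c hcb]
      · rw [List.cons_append, lcr_o c1 _ h1n h1r, lcr_o c1 r1 h1n h1r,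
            ← List.cons_append, tw1 (c1::r1) c hcb]

theorem S4 (r : List Char) (c : Char) (hr : r ≠ []) (hc : c = '\n' ∨ c = '\r')
    (hx : ¬(r = ['\n'] ∧ c = '\r')) : hbi (r ++ [c]) = true := by
  have hcb : brkC c = true := by rcases hc with rfl | rfl <;> decide
  rcases r with _ | ⟨c1, r1⟩
  · exact absurd rfl hr
  · by_cases h1n : c1 = '\n'
    · subst h1n
      rcases r1 with _ | ⟨c2, r2⟩
      · have hcn : c = '\n' := by
          rcases hc with rfl | rfl
          · rfl
          · exact absurd ⟨rfl, rfl⟩ hx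
        subst hcn; decide
      · by_cases h2r : c2 = '\r'
        · subst h2r
          rw [List.cons_append, List.cons_append, hbi_eq, bst_nr]
          simp [hcb]
        · rw [List.cons_append, List.cons_append, hbi_eq, bst_n c2 (r2 ++ [c]) h2r]
          simp [hcb]
    · by_cases h1r : c1 = '\r'
      · subst h1r
        rw [List.cons_append, hbi_eq, bst_r]
        simp [hcb]
      · rw [List.cons_append, hbi_eq, bst_o c1 (r1 ++ [c]) h1n h1r]
        simp [hcb]

theorem S2a (r : List Char) (c : Char) (hc : nbC c = true) (h : hbi r = true) :
    lcr (r ++ [c]) = lcr r := by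
  rcases r with _ | ⟨c1, r1⟩
  · simp [hbi, bSkipTerm] at h
  · by_cases h1n : c1 = '\n'
    · subst h1n
      rcases r1 with _ | ⟨c2, r2⟩
      · simp [hbi, bSkipTerm] at h
      · by_cases h2r : c2 = '\r'
        · subst h2r
          rw [hbi_eq, bst_nr] at h
          rw [List.cons_append, List.cons_append, lcr_nr, lcr_nr, tw2 r2 [c] h]
        · rw [hbi_eq, bst_n c2 r2 h2r] at h
          rw [List.cons_append, List.cons_append, lcr_n c2 _ h2r, lcr_n c2 r2 h2r,
              ← List.cons_append, tw2 (c2::r2) [c] h]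
    · by_cases h1r : c1 = '\r'
      · subst h1r
        rw [hbi_eq, bst_r] at h
        rw [List.cons_append, lcr_r, lcr_r, tw2 r1 [c] h]
      · rw [hbi_eq, bst_o c1 r1 h1n h1r] at h
        rw [List.cons_append, lcr_o c1 _ h1n h1r, lcr_o c1 r1 h1n h1r,
            ← List.cons_append, tw2 (c1::r1) [c] h]

theorem hbi_append_nb (r : List Char) (c : Char) (hc : nbC c = true) :
    hbi (r ++ [c]) = hbi r := by
  have hcb : brkC c = false := by simpa [nbC] using hc
  have hcn : c ≠ '\n' := by rintro rfl; simp [brkC] at hcb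
  have hcr : c ≠ '\r' := by rintro rfl; simp [brkC] at hcb
  rcases r with _ | ⟨c1, r1⟩
  · rw [List.nil_append, hbi_eq, bst_o c [] hcn hcr, hbi_eq]
    simp [bSkipTerm, hcb]
  · by_cases h1n : c1 = '\n'
    · subst h1n
      rcases r1 with _ | ⟨c2, r2⟩
      · rw [List.cons_append, List.nil_append, hbi_eq, bst_n c [] hcr, hbi_eq]
        simp [bSkipTerm, brkC, hcb]
        exact ⟨hcn, hcr⟩
      · by_cases h2r : c2 = '\r'
        · subst h2r
          rw [List.cons_append, List.cons_append, hbi_eq, bst_nr, hbi_eq, bst_nr]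
          simp [hcb]
        · rw [List.cons_append, List.cons_append, hbi_eq, bst_n c2 (r2 ++ [c]) h2r,
              hbi_eq, bst_n c2 r2 h2r]
          simp [hcb]
    · by_cases h1r : c1 = '\r'
      · subst h1r
        rw [List.cons_append, hbi_eq, bst_r, hbi_eq, bst_r]
        simp [hcb]
      · rw [List.cons_append, hbi_eq, bst_o c1 (r1 ++ [c]) h1n h1r,
            hbi_eq, bst_o c1 r1 h1n h1r]
        simp [hcb]

theorem lcr_drop (r : List Char) :
    (lcr r).dropWhile PySem.Chars.isspace
      = ((bSkipTerm r).takeWhile nbC).dropWhile PySem.Chars.isspace := by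
  rcases r with _ | ⟨c1, r1⟩
  · rfl
  · by_cases h1n : c1 = '\n'
    · subst h1n
      rcases r1 with _ | ⟨c2, r2⟩
      · decide
      · by_cases h2r : c2 = '\r'
        · subst h2r
          rw [lcr_nr, bst_nr,
              List.dropWhile_cons_of_pos (by decide), List.dropWhile_cons_of_pos (by decide)]
        · rw [lcr_n c2 r2 h2r, bst_n c2 r2 h2r, List.dropWhile_cons_of_pos (by decide)]
    · by_cases h1r : c1 = '\r'
      · subst h1r
        rw [lcr_r, bst_r, List.dropWhile_cons_of_pos (by decide)]
      · rw [lcr_o c1 r1 h1n h1r, bst_o c1 r1 h1n h1r]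
/-- The last keepends line of A's split, characterized on the reversed input. -/
theorem splitKeep_last : ∀ (l cur : List Char) (acc : List (List Char)),
    (∀ c ∈ l, pvDomChar c = true) →
    (splitKeep l cur acc).getLast? =
      (if hbi l.reverse = true then some ((lcr l.reverse).reverse)
       else if l = [] ∧ cur = [] then acc.reverse.getLast?
       else some (cur.reverse ++ l)) := by
  intro l cur acc
  induction l, cur, acc using splitKeep.induct with
  | case1 cur acc hcur =>
    intro _
    have hc : cur = [] := by simpa [List.isEmpty_iff] using hcur
    subst hc
    simp [splitKeep, hbi, bSkipTerm]
  | case2 cur acc hcur =>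
    intro _
    have hc : cur ≠ [] := by simpa [List.isEmpty_iff] using hcur
    simp [splitKeep, hcur, hbi, bSkipTerm, hc]
  | case3 rest cur acc ih =>
    intro hdom
    have hdr : ∀ x ∈ rest, pvDomChar x = true := fun x hx => hdom x (by simp [hx])
    rw [splitKeep.eq_2, ih hdr]
    rcases eq_or_ne rest [] with rfl | hrne
    · simp [hbi, bSkipTerm, List.getLast?_concat]
    · have hrr : rest.reverse ≠ [] := by simpa using hrne
      have hx1 : ¬(rest.reverse = ['\n'] ∧ ('\n' : Char) = '\r') := by simp
      have hx2 : ¬(rest.reverse ++ ['\n'] = ['\n'] ∧ ('\r' : Char) = '\r') := by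
        rintro ⟨he, -⟩
        have := congrArg List.length he
        simp at this
        exact hrne (by simpa using this)
      have hb1 : hbi ((rest.reverse ++ ['\n']) ++ ['\r']) = true :=
        S4 _ _ (by simp) (Or.inr rfl) hx2
      have hl2 : lcr ((rest.reverse ++ ['\n']) ++ ['\r']) = lcr (rest.reverse ++ ['\n']) :=
        S1 _ _ (by simp) (Or.inr rfl) hx2
      have hl1 : lcr (rest.reverse ++ ['\n']) = lcr rest.reverse :=
        S1 _ _ hrr (Or.inl rfl) hx1
      have e1 : ('\r'::'\n'::rest).reverse = (rest.reverse ++ ['\n']) ++ ['\r'] := by simp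
      rw [e1, hb1, if_pos rfl, hl2, hl1]
      by_cases hh : hbi rest.reverse = true
      · rw [if_pos hh]
      · rw [if_neg hh, if_neg (by simp [hrne]), lcr_of_not_hbi _ (by simpa using hh)]
        simp
  | case4 c rest cur acc hne hb ih =>
    intro hdom
    have hdc : pvDomChar c = true := hdom c (by simp)
    have hdr : ∀ x ∈ rest, pvDomChar x = true := fun x hx => hdom x (by simp [hx])
    have hc2 : c = '\n' ∨ c = '\r' := break_dom c hdc hb
    rw [splitKeep.eq_3 _ _ _ _ hne, if_pos hb, ih hdr]
    rcases eq_or_ne rest [] with rfl | hrne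
    · have h0 : hbi ([] : List Char) = false := by decide
      have hbf : hbi [c] = false := by rcases hc2 with rfl | rfl <;> decide
      rw [List.reverse_nil, h0, if_neg (by simp), if_pos ⟨rfl, rfl⟩,
          show ([c] : List Char).reverse = [c] from rfl, hbf, if_neg (by simp),
          if_neg (by simp)]
      simp
    · have hrr : rest.reverse ≠ [] := by simpa using hrne
      have hxx : ¬(rest.reverse = ['\n'] ∧ c = '\r') := by
        rintro ⟨h1, rfl⟩
        have h2 : rest = ['\n'] := by simpa using congrArg List.reverse h1
        exact hne [] rfl h2
      have hb4 := S4 rest.reverse c hrr hc2 hxx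
      have hl4 := S1 rest.reverse c hrr hc2 hxx
      have e : (c :: rest).reverse = rest.reverse ++ [c] := by simp
      rw [e, hb4, if_pos rfl, hl4]
      by_cases hh : hbi rest.reverse = true
      · rw [if_pos hh]
      · rw [if_neg hh, if_neg (by simp [hrne]), lcr_of_not_hbi _ (by simpa using hh)]
        simp
  | case5 c rest cur acc hne hb ih =>
    intro hdom
    have hdr : ∀ x ∈ rest, pvDomChar x = true := fun x hx => hdom x (by simp [hx])
    have hnb : nbC c = true := nb_of_not_break c (by simpa using hb)
    rw [splitKeep.eq_3 _ _ _ _ hne, if_neg (by simp [hb]), ih hdr]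
    have e : (c :: rest).reverse = rest.reverse ++ [c] := by simp
    rw [e, hbi_append_nb _ _ hnb]
    by_cases hh : hbi rest.reverse = true
    · rw [if_pos hh, if_pos hh, S2a _ _ hnb hh]
    · rw [if_neg hh, if_neg hh, if_neg (by simp), if_neg (by simp)]
      simp

theorem bst_mem (r : List Char) : ∀ c ∈ bSkipTerm r, c ∈ r := by
  rcases r with _ | ⟨c1, r1⟩
  · simp [bSkipTerm]
  · by_cases h1n : c1 = '\n'
    · subst h1n
      rcases r1 with _ | ⟨c2, r2⟩
      · simp [bSkipTerm]
      · by_cases h2r : c2 = '\r'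
        · subst h2r
          rw [bst_nr]
          intro c hc
          simp [hc]
        · rw [bst_n c2 r2 h2r]
          intro c hc
          exact List.mem_cons_of_mem _ hc
    · by_cases h1r : c1 = '\r'
      · subst h1r
        rw [bst_r]
        intro c hc
        exact List.mem_cons_of_mem _ hc
      · rw [bst_o c1 r1 h1n h1r]
        intro c hc
        exact hc

/-- On Dom characters, stripping Python whitespace inside the break-free region and
    stripping blanks agree on the trailing backslash run. -/
theorem bridgeC : ∀ (x : List Char), (∀ c ∈ x, pvDomChar c = true) →
    ((x.takeWhile nbC).dropWhile PySem.Chars.isspace).takeWhile (· == '\\')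
      = (x.dropWhile (fun c => c == ' ' || c == '\t')).takeWhile (· == '\\') := by
  intro x
  induction x with
  | nil => intro _; rfl
  | cons c r ih =>
    intro hdom
    have hdc : pvDomChar c = true := hdom c (by simp)
    have hdr : ∀ a ∈ r, pvDomChar a = true := fun a ha => hdom a (by simp [ha])
    by_cases hsp : (c == ' ' || c == '\t') = true
    · have hcsp : c = ' ' ∨ c = '\t' := by simpa using hsp
      have hnb : nbC c = true := by rcases hcsp with rfl | rfl <;> decide
      have hsw : PySem.Chars.isspace c = true := by rcases hcsp with rfl | rfl <;> decide
      simp only [List.takeWhile_cons, hnb, if_true, List.dropWhile_cons, hsw, hsp]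
      exact ih hdr
    · by_cases hbk : brkC c = true
      · have hc2 : c = '\n' ∨ c = '\r' := by simpa [brkC] using hbk
        have hnb : nbC c = false := by simp [nbC, hbk]
        have hbs : (c == '\\') = false := by rcases hc2 with rfl | rfl <;> decide
        simp [List.takeWhile_cons, List.dropWhile_cons, hnb, hsp, hbs]
      · have hnb : nbC c = true := by simp [nbC, hbk]
        have h1 : (c == ' ') = false ∧ (c == '\t') = false := by simpa using hsp
        have h2 : (c == '\n') = false ∧ (c == '\r') = false := by simpa [brkC] using hbk
        have hsw : PySem.Chars.isspace c = false := by
          rw [isspace_dom c hdc, h1.1, h1.2, h2.1, h2.2]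
          rfl
        simp only [List.takeWhile_cons, hnb, if_true, List.dropWhile_cons, hsw, hsp]
        by_cases hb : (c == '\\') = true
        · simp [List.takeWhile_cons, hb, tw_bs_nb]
        · simp [List.takeWhile_cons, hb]

/-- A's match arm equals B's three-phase backward walk, for the characterized chunk. -/
theorem arms (r : List Char) (hdr : ∀ c ∈ bSkipTerm r, pvDomChar c = true) :
    (if PySem.Chars.endswith
          (if PySem.Chars.endswith ((lcr r).reverse) ['\n'] then
            PySem.Chars.rstrip (PySem.List.slice ((lcr r).reverse) none (some (-1)))
          else PySem.Chars.rstrip ((lcr r).reverse)) ['\\'] then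
        ((countPrec
            (if PySem.Chars.endswith ((lcr r).reverse) ['\n'] then
              PySem.Chars.rstrip (PySem.List.slice ((lcr r).reverse) none (some (-1)))
            else PySem.Chars.rstrip ((lcr r).reverse)) 0
            ((if PySem.Chars.endswith ((lcr r).reverse) ['\n'] then
              PySem.Chars.rstrip (PySem.List.slice ((lcr r).reverse) none (some (-1)))
            else PySem.Chars.rstrip ((lcr r).reverse)).length - 1)) % 2 == 0 : Bool)
      else false)
    = bOdd (bSkipWs (bSkipTerm r)) false := by
  rw [content_eq, tail_parity, rstrip_reverse, List.reverse_reverse, lcr_drop,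
      bridgeC _ hdr, bOdd_parity, bSkipWs_eq]
  simp

-- ===== VERDICT (by name: the statement is the Claim_ definition above) =====
theorem has_line_continuation_py_spec : Claim_equal_has_line_continuation_py := by
  intro command hdom
  unfold Spec_has_line_continuation_py
  unfold has_line_continuation_py has_line_continuation_py_alt
  have hdl : ∀ c ∈ command.toList, pvDomChar c = true := by
    unfold Dom_has_line_continuation_py pvDomStr at hdom
    simpa [List.all_eq_true] using hdom
  by_cases hemp : command.toList.isEmpty
  · have he : command.toList = [] := by simpa using hemp
    rw [if_pos hemp, he]
    rfl
  · rw [if_neg hemp]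
    have hlne : command.toList ≠ [] := by simpa [List.isEmpty_iff] using hemp
    have hchunk : (splitKeep command.toList [] []).getLast?
        = some ((lcr command.toList.reverse).reverse) := by
      rw [splitKeep_last command.toList [] [] hdl]
      by_cases hh : hbi command.toList.reverse = true
      · rw [if_pos hh]
      · rw [if_neg hh, if_neg (by simp [hlne]), lcr_of_not_hbi _ (by simpa using hh)]
        simp
    have hlinesne : splitKeep command.toList [] [] ≠ [] := by
      intro h0
      rw [h0] at hchunk
      simp at hchunk
    rw [if_neg (by simpa [List.isEmpty_iff] using hlinesne)]
    rw [pyGet_neg_one _ hlinesne, ← List.getLast?_eq_getElem?, hchunk]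
    have hdsub : ∀ c ∈ bSkipTerm command.toList.reverse, pvDomChar c = true :=
      fun c hc => hdl c (List.mem_reverse.mp (bst_mem _ c hc))
    exact arms command.toList.reverse hdsub
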